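-- pv_equiv track=rewrite | github.com/josecatela/sgcodewars | day3/day3.py | jorge_diamond
-- ===== SOURCE A (Python) =====
-- def jorge_diamond(number):
--     if (number % 2 == 0) | (number <= 0):
--         return 'null/nil/None/...'
--     #number = number -1
--     l = ["*"*num for num in range(number+1) if num % 2 !=0]
--     l2 = l.copy()
--     l2.reverse()
--     l1 = [(i*' ')+item for i, item in enumerate(l2) if len(item)<number]
--     l3 = l1.copy()
--     l3.reverse()
--     l3.append(l[-1])
--     l4 = [item+'\n' for item in l3]
--     l1 = [item+'\n' for item in l1]
--     fl = l4 + l1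
--     return ''.join(fl)
-- ===== SOURCE B (Python) =====
-- def jorge_diamond(number):
--     if (number % 2 == 0) | (number <= 0):
--         return 'null/nil/None/...'
--     half = number // 2
--     rows = []
--     for i in range(number):
--         d = abs(half - i)
--         rows.append(' ' * d + '*' * (number - 2 * d) + '\n')
--     return ''.join(rows)
-- ===== Notes on version B (the rewrite author's own statement) =====
-- stated objective: simpler
-- what changed: Replaced A's build-half/copy/reverse/enumerate/mirror list pipeline with a single pass over row indices that emits each row directly from its distance to the center.
import Mathlib
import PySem

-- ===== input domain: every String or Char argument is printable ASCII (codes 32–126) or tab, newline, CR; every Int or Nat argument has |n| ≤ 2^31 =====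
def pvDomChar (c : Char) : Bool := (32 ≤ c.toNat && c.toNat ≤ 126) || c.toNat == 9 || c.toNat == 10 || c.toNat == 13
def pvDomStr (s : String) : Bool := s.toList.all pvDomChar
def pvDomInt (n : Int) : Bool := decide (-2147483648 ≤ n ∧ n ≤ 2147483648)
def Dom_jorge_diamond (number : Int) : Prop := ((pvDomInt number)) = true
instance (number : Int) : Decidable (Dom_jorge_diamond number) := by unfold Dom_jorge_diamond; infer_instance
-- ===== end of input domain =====

-- B replaces A's build-half/copy/reverse/enumerate/mirror pipeline with a single pass
-- emitting each row from its distance to the center (objective: simpler).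

-- ===== PORT A =====
-- strings are ported as List Char (PySem.Chars level); ''.join(fl) is concatenation, List.flatten (exact)
def jorge_diamond (number : Int) : String :=
  if PySem.Int.mod number 2 == 0 || decide (number ≤ 0) then "null/nil/None/..."
  else
    let l := ((PySem.List.pyRange 0 (number + 1) 1).filter
                (fun num => decide (PySem.Int.mod num 2 ≠ 0))).map
              (fun num => PySem.List.pyRepeat ['*'] num)
    let l2 := l.reverse
    let l1 := ((PySem.List.enumerate l2 0).filter
                (fun p => decide ((p.2.length : Int) < number))).map
              (fun p => PySem.List.pyRepeat [' '] p.1 ++ p.2)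
    let l3 := l1.reverse ++ [PySem.List.pyGetD l (-1) []]   -- l[-1]; l is nonempty here since number ≥ 1
    let l4 := l3.map (fun item => item ++ ['\n'])
    let l1b := l1.map (fun item => item ++ ['\n'])
    let fl := l4 ++ l1b
    String.ofList fl.flatten

-- ===== PORT B =====
def jorge_diamond_alt (number : Int) : String :=
  if PySem.Int.mod number 2 == 0 || decide (number ≤ 0) then "null/nil/None/..."
  else
    let half := PySem.Int.floordiv number 2
    let rows := (PySem.List.pyRange 0 number 1).foldl
      (fun acc i =>
        let d := |half - i|
        acc ++ [PySem.List.pyRepeat [' '] d ++ PySem.List.pyRepeat ['*'] (number - 2 * d) ++ ['\n']]) []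
    String.ofList rows.flatten

-- ===== PRECONDITION & SPEC =====
def Spec_jorge_diamond (number : Int) (out : String) : Prop := out = jorge_diamond_alt number
instance (number : Int) (out : String) : Decidable (Spec_jorge_diamond number out) := by unfold Spec_jorge_diamond; infer_instance

-- ===== CLAIM (what is proved, stated in full; the proofs are below) =====
def Claim_equal_jorge_diamond : Prop := ∀ (number : Int), Dom_jorge_diamond number → Spec_jorge_diamond number (jorge_diamond number)

-- ===== LEMMAS AND PROOFS =====

-- Python's % and // by 2 agree with Lean's emod/ediv (divisor positive)
lemma pvMod2 (a : Int) : PySem.Int.mod a 2 = a % 2 := by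
  show Int.fmod a 2 = a % 2
  rw [Int.fmod_eq_emod]; norm_num

lemma pvDiv2 (a : Int) : PySem.Int.floordiv a 2 = a / 2 := by
  show Int.fdiv a 2 = a / 2
  rw [Int.fdiv_eq_ediv]; norm_num

-- the common normal form: row t (counted from the top) of a diamond of half-width k
def pvRow (k t : Nat) : List Char :=
  List.replicate (k - t) ' ' ++ (List.replicate (2 * t + 1) '*' ++ ['\n'])

def pvDiamond (k : Nat) : List (List Char) :=
  (List.range (k + 1)).map (pvRow k) ++ (List.range k).map (fun t => pvRow k (k - 1 - t))

lemma pvRow_build (k t a b : Nat) (ha : a = k - t) (hb : b = 2 * t + 1) :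
    (List.replicate a ' ' ++ List.replicate b '*') ++ ['\n'] = pvRow k t := by
  subst ha hb
  simp [pvRow]

lemma enumerate_map_range {α : Type} (f : Nat → α) :
    ∀ (m : Nat) (s : Int), PySem.List.enumerate ((List.range m).map f) s
      = (List.range m).map (fun (i : Nat) => ((s + i : Int), f i)) := by
  intro m
  induction m with
  | zero => intro s; simp [PySem.List.enumerate_nil]
  | succ m ih =>
    intro s
    rw [List.range_succ, List.map_append, List.map_append,
        PySem.List.enumerate_append, ih]
    simp [PySem.List.enumerate_cons, PySem.List.enumerate_nil]

lemma rev_map_range {α : Type} (f : Nat → α) (m : Nat) :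
    ((List.range m).map f).reverse = (List.range m).map (fun i => f (m - 1 - i)) := by
  apply List.ext_getElem
  · simp
  · intro i h1 h2
    simp only [List.length_reverse, List.length_map, List.length_range] at h1 h2
    simp [List.getElem_reverse]

-- A's first comprehension: the odd-length star strings
lemma lA_eq (k : Nat) :
    ((PySem.List.pyRange 0 (2 * (k : Int) + 1 + 1) 1).filter
        (fun num => decide (PySem.Int.mod num 2 ≠ 0))).map
      (fun num => PySem.List.pyRepeat ['*'] num)
    = (List.range (k + 1)).map (fun j => List.replicate (2 * j + 1) '*') := by
  induction k with
  | zero => decide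
  | succ k ih =>
    have h1 : (2 * ((k : Int) + 1) + 1 + 1) = (2 * (k : Int) + 1 + 1) + 1 + 1 := by ring
    push_cast
    rw [h1, PySem.List.pyRange_one_succ_right (by omega),
        PySem.List.pyRange_one_succ_right (by omega),
        List.filter_append, List.filter_append]
    push_cast at ih
    rw [List.map_append, List.map_append, ih]
    have he : PySem.Int.mod (2 * (k : Int) + 1 + 1) 2 = 0 := by rw [pvMod2]; omega
    have ho : PySem.Int.mod (2 * (k : Int) + 1 + 1 + 1) 2 = 1 := by rw [pvMod2]; omega
    rw [List.range_succ (n := k + 1), List.map_append]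
    simp only [List.filter_cons, List.filter_nil, he, ho]
    norm_num [PySem.List.pyRepeat_singleton]
    omega

-- A's value on an odd positive argument
lemma A_eq (k : Nat) :
    jorge_diamond (2 * (k : Int) + 1) = String.ofList (pvDiamond k).flatten := by
  have hg : (PySem.Int.mod (2 * (k : Int) + 1) 2 == 0 || decide ((2 * (k : Int) + 1) ≤ 0)) = false := by
    simp
  unfold jorge_diamond
  rw [hg]
  simp only [Bool.false_eq_true, if_false]
  rw [lA_eq k]
  rw [rev_map_range]
  rw [enumerate_map_range]
  rw [List.filter_map, List.map_map]
  have hfil : (List.range (k + 1)).filter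
      ((fun p : Int × List Char => decide ((p.2.length : Int) < 2 * (k : Int) + 1)) ∘
        (fun i : Nat => ((0 + i : Int), List.replicate (2 * (k + 1 - 1 - i) + 1) '*')))
      = (List.range k).map (fun t => t + 1) := by
    rw [List.range_succ_eq_map]
    rw [List.filter_cons]
    have h0 : ((fun p : Int × List Char => decide ((p.2.length : Int) < 2 * (k : Int) + 1)) ∘
        (fun i : Nat => ((0 + i : Int), List.replicate (2 * (k + 1 - 1 - i) + 1) '*'))) 0 = false := by
      simp
    rw [h0]
    simp only [Bool.false_eq_true, if_false]
    rw [List.filter_map]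
    have hall : (List.range k).filter
        (((fun p : Int × List Char => decide ((p.2.length : Int) < 2 * (k : Int) + 1)) ∘
          (fun i : Nat => ((0 + i : Int), List.replicate (2 * (k + 1 - 1 - i) + 1) '*'))) ∘
          (fun t : Nat => t + 1)) = List.range k := by
      apply List.filter_eq_self.mpr
      intro a ha
      simp only [Function.comp, List.length_replicate, decide_eq_true_iff]
      have := List.mem_range.mp ha
      push_cast
      omega
    rw [hall]
  rw [hfil]
  rw [List.map_map]
  have hl1 : (((fun p : Int × List Char => PySem.List.pyRepeat [' '] p.1 ++ p.2) ∘
        (fun i : Nat => ((0 + i : Int), List.replicate (2 * (k + 1 - 1 - i) + 1) '*'))) ∘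
          (fun t : Nat => t + 1))
      = fun t : Nat => List.replicate (t + 1) ' ' ++ List.replicate (2 * (k - 1 - t) + 1) '*' := by
    funext t
    simp only [Function.comp]
    rw [PySem.List.pyRepeat_singleton]
    congr 2
    · omega
    · omega
  rw [hl1]
  have hlast : PySem.List.pyGetD
      ((List.range (k + 1)).map (fun j => List.replicate (2 * j + 1) '*')) (-1) []
      = List.replicate (2 * k + 1) '*' := by
    rw [List.range_succ, List.map_append]
    exact PySem.List.pyGetD_neg_one_append_singleton _ _ _
  rw [hlast, rev_map_range]
  unfold pvDiamond
  rw [List.range_succ (n := k)]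
  simp only [List.map_append, List.map_map, List.map_cons, List.map_nil]
  congr 1
  congr 1
  congr 1
  · congr 1
    · apply List.map_congr_left
      intro t ht
      have hmem := List.mem_range.mp ht
      simp only [Function.comp]
      exact pvRow_build k t _ _ (by omega) (by omega)
    · simp [pvRow]
  · apply List.map_congr_left
    intro t ht
    have hmem := List.mem_range.mp ht
    simp only [Function.comp]
    exact pvRow_build k (k - 1 - t) _ _ (by omega) (by omega)

-- B's value on an odd positive argument
lemma B_eq (k : Nat) :
    jorge_diamond_alt (2 * (k : Int) + 1) = String.ofList (pvDiamond k).flatten := by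
  have hg : (PySem.Int.mod (2 * (k : Int) + 1) 2 == 0 || decide ((2 * (k : Int) + 1) ≤ 0)) = false := by
    simp
  unfold jorge_diamond_alt
  rw [hg]
  simp only [Bool.false_eq_true, if_false]
  have hhalf : PySem.Int.floordiv (2 * (k : Int) + 1) 2 = k := by rw [pvDiv2]; omega
  rw [hhalf, PySem.List.foldl_append_singleton_eq_map]
  simp only [List.nil_append]
  rw [PySem.List.pyRange_one_append 0 ((k : Int) + 1) (2 * (k : Int) + 1) (by omega) (by omega)]
  rw [List.map_append]
  unfold pvDiamond
  congr 1
  congr 1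
  congr 1
  · rw [PySem.List.pyRange_one, List.map_map]
    have hto : ((k : Int) + 1 - 0).toNat = k + 1 := by omega
    rw [hto]
    apply List.map_congr_left
    intro t ht
    have hmem := List.mem_range.mp ht
    simp only [Function.comp]
    rw [PySem.List.pyRepeat_singleton, PySem.List.pyRepeat_singleton,
        abs_of_nonneg (by omega : (0 : Int) ≤ (k : Int) - (0 + (t : Int)))]
    exact pvRow_build k t _ _ (by omega) (by omega)
  · rw [PySem.List.pyRange_one, List.map_map]
    have hto : (2 * (k : Int) + 1 - ((k : Int) + 1)).toNat = k := by omega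
    rw [hto]
    apply List.map_congr_left
    intro t ht
    have hmem := List.mem_range.mp ht
    simp only [Function.comp]
    rw [PySem.List.pyRepeat_singleton, PySem.List.pyRepeat_singleton,
        abs_of_nonpos (by omega : (k : Int) - ((k : Int) + 1 + (t : Int)) ≤ 0)]
    exact pvRow_build k (k - 1 - t) _ _ (by omega) (by omega)

-- ===== VERDICT (by name: the statement is the Claim_ definition above) =====
theorem jorge_diamond_spec : Claim_equal_jorge_diamond := by
  intro number _
  unfold Spec_jorge_diamond
  by_cases hguard : (PySem.Int.mod number 2 == 0 || decide (number ≤ 0)) = true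
  · unfold jorge_diamond jorge_diamond_alt
    rw [hguard]
    simp
  · have h1 : PySem.Int.mod number 2 ≠ 0 ∧ ¬ (number ≤ 0) := by
      simpa using hguard
    have hk : ∃ k : Nat, number = 2 * (k : Int) + 1 := by
      refine ⟨((number - 1) / 2).toNat, ?_⟩
      have := h1.1
      rw [pvMod2] at this
      omega
    obtain ⟨k, hk⟩ := hk
    rw [hk, A_eq, B_eq]
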